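-- pv_equiv track=rewrite | github.com/shufay/CS2 | networking/bonus/palindrome.py | palindrome
-- ===== SOURCE A (Python) =====
-- def palindrome(string):
-- 	original = list(string)
-- 	half = len(string) // 2 + 1
-- 	unpaired = 0
-- 	i = 0
--
-- 	while i < half:
-- 		# check if string is a palindrome
-- 		reverse = original[::-1]
--
-- 		if reverse == original:
-- 			return ''.join(original)
--
-- 		# if there are more than two single letters, it is not
-- 		# a palindrome
-- 		if unpaired > 1:
-- 			return ''
--
-- 		char = original[i]
--
-- 		# get substring that is behind 'char'
-- 		if i == 0:
-- 			sub = original[i+1:]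
--
-- 		else:
-- 			sub = original[i+1:-i]
--
-- 		# if 'char' is also found in substring, then move 'char'
-- 		# in substring to the end.
-- 		if sub.count(char) > 0:
-- 			pos = sub.index(char) + i + 1
-- 			del original[pos]
--
-- 			if i == 0:
-- 				original.append(char)
--
-- 			else:
-- 				original.insert(-i, char)
--
-- 			i += 1
--
-- 		# if there is only one 'char', move 'char' to middle
-- 		else:
-- 			original.insert(half, char)
-- 			del original[i]
-- 			unpaired += 1
-- ===== SOURCE B (Python) =====
-- def palindrome(string):
--     # Three-zone reformulation: mirrored outer zone `left` (right side implicit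
--     # as its reverse) and unprocessed middle zone `mid`.
--     half = len(string) // 2 + 1
--     left, mid, unpaired = [], list(string), 0
--     while mid[::-1] != mid:
--         if unpaired > 1:
--             return ''
--         c, rest = mid[0], mid[1:]
--         if c in rest:
--             j = rest.index(c)
--             left.append(c)
--             mid = rest[:j] + rest[j + 1:]
--         else:
--             k = half - len(left) - 1
--             mid = rest[:k] + [c] + rest[k:]
--             unpaired += 1
--     return ''.join(left) + ''.join(mid) + ''.join(reversed(left))
-- ===== Notes on version B (the rewrite author's own statement) =====
-- stated objective: alternative
-- what changed: B replaces A's single in-place array mutated by del/insert at absolute and negative indices (re-slicing and re-reversing the whole array each iteration) with a left-zone/middle-zone state (left, mid) where the right half is implicit as reverse(left): the palindrome test, the pair search and the unpaired-character move all act only on the shrinking middle zone.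
import Mathlib
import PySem

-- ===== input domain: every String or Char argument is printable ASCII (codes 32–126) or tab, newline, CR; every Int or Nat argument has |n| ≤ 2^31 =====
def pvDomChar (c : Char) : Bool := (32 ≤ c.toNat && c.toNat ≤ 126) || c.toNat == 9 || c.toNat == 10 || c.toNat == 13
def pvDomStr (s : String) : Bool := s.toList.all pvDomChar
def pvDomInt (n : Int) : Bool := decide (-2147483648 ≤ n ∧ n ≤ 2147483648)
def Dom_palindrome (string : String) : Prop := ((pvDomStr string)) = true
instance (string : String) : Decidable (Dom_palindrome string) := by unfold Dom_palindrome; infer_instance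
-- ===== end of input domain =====

-- B rearranges the string via a mirrored-outer-zone / middle-zone state (left, mid) instead of
-- A's in-place del/insert on one array with absolute indices; same return value, alternative structure.

-- ===== PORT A =====
-- A's while loop: state (original, i, unpaired); falls off the loop end returning Python None (= none).
-- The arms marked "unreachable" are where Python would raise (IndexError); they are never hit on any input.
def palindromeLoopA (half : Nat) (original : List Char) (i unpaired : Nat) : Option String :=
  if _h : i < half then
    -- reverse = original[::-1]; PySem.List.slice? xs none none (-1) = some xs.reverse
    let rev := original.reverse
    if rev = original then some (String.ofList original)
    else if _h2 : unpaired > 1 then some ""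
    else
      match PySem.List.pyGet? original (i : Int) with
      | none => none  -- unreachable: Python IndexError
      | some c =>
        let sub := if i = 0 then PySem.List.slice original (some ((i : Int) + 1)) none
                   else PySem.List.slice original (some ((i : Int) + 1)) (some (-(i : Int)))
        if PySem.List.count sub c > 0 then
          match PySem.List.index? sub c with
          | none => none  -- unreachable: count > 0 guarantees membership
          | some idx =>
            let pos := idx + i + 1
            match PySem.List.pop? original (pos : Int) with  -- del original[pos]
            | none => none  -- unreachable
            | some (_, deleted) =>
              let original' := if i = 0 then deleted ++ [c]
                               else PySem.List.insert deleted (-(i : Int)) c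
              palindromeLoopA half original' (i + 1) unpaired
        else
          let inserted := PySem.List.insert original (half : Int) c
          match PySem.List.pop? inserted (i : Int) with  -- del original[i]
          | none => none  -- unreachable
          | some (_, original') =>
            palindromeLoopA half original' i (unpaired + 1)
  else none
termination_by 3 * (half - i) + (2 - unpaired)
decreasing_by
  · omega
  · omega

def palindrome (string : String) : Option String :=
  -- half = len(string) // 2 + 1  (length is a Nat, so Python's // is Nat division here)
  palindromeLoopA (string.toList.length / 2 + 1) string.toList 0 0

-- ===== PORT B =====
-- Source B's while loop as structural recursion on the state (left, mid, unpaired).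
def palindromeGoB (half : Nat) (left mid : List Char) (unpaired : Nat) : Option String :=
  if mid.reverse = mid then
    some (String.ofList (left ++ mid ++ left.reverse))
  else if _h2 : unpaired > 1 then some ""
  else
    match mid with
    | [] => some ""  -- unreachable: [] passes the palindrome test above
    | c :: rest =>
      match _hj : PySem.List.index? rest c with
      | some j => palindromeGoB half (left ++ [c]) (rest.take j ++ rest.drop (j + 1)) unpaired
      | none =>
        let k := half - left.length - 1
        palindromeGoB half left (rest.take k ++ c :: rest.drop k) (unpaired + 1)
termination_by 3 * mid.length + (2 - unpaired)
decreasing_by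
  · have := PySem.List.getElem_of_index?_eq_some _hj
    obtain ⟨hk, -, -⟩ := this
    simp
    omega
  · simp
    omega

def palindrome_alt (string : String) : Option String :=
  palindromeGoB (string.toList.length / 2 + 1) [] string.toList 0

-- ===== PRECONDITION & SPEC =====
def Spec_palindrome (string : String) (out : Option String) : Prop := out = palindrome_alt string
instance (string : String) (out : Option String) : Decidable (Spec_palindrome string out) := by unfold Spec_palindrome; infer_instance

-- ===== CLAIM (what is proved, stated in full; the proofs are below) =====
def Claim_equal_palindrome : Prop := ∀ (string : String), Dom_palindrome string → Spec_palindrome string (palindrome string)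

-- ===== LEMMAS AND PROOFS =====

-- eraseIdx inside the middle of a concatenation
theorem pvEraseMid (P Q : List Char) (t : Nat) :
    (P ++ Q).eraseIdx (P.length + t) = P ++ Q.eraseIdx t := by
  induction P with
  | nil => simp
  | cons p ps ih => simpa [Nat.succ_add] using ih

-- eraseIdx inside the left part of a concatenation
theorem pvEraseLeft (Q R : List Char) (t : Nat) (ht : t < Q.length) :
    (Q ++ R).eraseIdx t = Q.eraseIdx t ++ R := by
  induction Q generalizing t with
  | nil => simp at ht
  | cons q qs ih =>
    cases t with
    | zero => simp
    | succ t' => simpa using ih t' (by simpa using ht)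

-- Python list.insert with a negative in-range index
theorem pvInsertNeg (xs : List Char) (k : Nat) (hk : 0 < k) (v : Char) :
    PySem.List.insert xs (-(k : Int)) v
      = xs.take (xs.length - k) ++ v :: xs.drop (xs.length - k) := by
  simp only [PySem.List.insert, PySem.List.sliceIndices]
  norm_num
  have h : (if 0 < k then max (-(k : Int) + ↑xs.length) 0 else -(k : Int)).toNat
      = xs.length - k := by rw [if_pos hk]; omega
  rw [h]

-- xs[a:-k] for natural a and 0 < k
theorem pvSlicePosNeg (xs : List Char) (a k : Nat) (hk : 0 < k) (ha : a ≤ xs.length) :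
    PySem.List.slice xs (some (a : Int)) (some (-(k : Int)))
      = (xs.drop a).take (xs.length - k - a) := by
  simp only [PySem.List.slice, PySem.List.clampIdx_neg_natCast _ _ hk,
    PySem.List.clampIdx_natCast]
  rw [Nat.min_eq_left ha]

-- the full array is a palindrome iff the middle zone is
theorem pvRevBridge (L M : List Char) :
    ((L ++ M ++ L.reverse).reverse = L ++ M ++ L.reverse) ↔ (M.reverse = M) := by
  simp [List.reverse_append, List.append_assoc]

-- Invariant: A's array is always left ++ mid ++ left.reverse with i = left.length,
-- and half = (2*left.length + mid.length)/2 + 1 throughout.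
theorem loopA_eq_goB (fuel : Nat) :
    ∀ (L M : List Char) (u half : Nat),
      half = (2 * L.length + M.length) / 2 + 1 →
      3 * M.length + (2 - u) ≤ fuel →
      palindromeLoopA half (L ++ M ++ L.reverse) L.length u = palindromeGoB half L M u := by
  induction fuel with
  | zero =>
    intro L M u half hh hf
    have hM : M = [] := List.eq_nil_of_length_eq_zero (by omega)
    subst hM
    rw [palindromeLoopA.eq_def, palindromeGoB.eq_def]
    rw [dif_pos (show L.length < half by omega)]
    rw [if_pos ((pvRevBridge L []).mpr (by simp)), if_pos (by simp)]
  | succ n ih =>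
    intro L M u half hh hf
    have hhalf2 : half = M.length / 2 + L.length + 1 := by omega
    rw [palindromeLoopA.eq_def, palindromeGoB.eq_def]
    rw [dif_pos (show L.length < half by omega)]
    by_cases hp : M.reverse = M
    · rw [if_pos ((pvRevBridge L M).mpr hp), if_pos hp]
    · rw [if_neg (fun h => hp ((pvRevBridge L M).mp h)), if_neg hp]
      by_cases hu : u > 1
      · rw [dif_pos hu, dif_pos hu]
      · rw [dif_neg hu, dif_neg hu]
        match M, hp with
        | c :: rest, hp =>
        have hget : PySem.List.pyGet? (L ++ (c :: rest) ++ L.reverse) (L.length : Int)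
            = some c := by
          rw [PySem.List.pyGet?_natCast]
          simp
        have hsub : (if L.length = 0
              then PySem.List.slice (L ++ (c :: rest) ++ L.reverse) (some ((L.length : Int) + 1)) none
              else PySem.List.slice (L ++ (c :: rest) ++ L.reverse) (some ((L.length : Int) + 1)) (some (-(L.length : Int)))) = rest := by
          by_cases hL : L.length = 0
          · have hLnil : L = [] := List.eq_nil_of_length_eq_zero hL
            subst hLnil
            rw [if_pos hL, PySem.List.slice_from _ (by omega)]
            simp
          · rw [if_neg hL]
            have hcast : ((L.length : Int) + 1) = ((L.length + 1 : Nat) : Int) := by push_cast; ring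
            rw [hcast, pvSlicePosNeg _ _ _ (by omega) (by simp)]
            have h1 : L ++ (c :: rest) ++ L.reverse = (L ++ [c]) ++ (rest ++ L.reverse) := by simp
            rw [h1, List.drop_left' (by simp)]
            have h2 : (L ++ [c] ++ (rest ++ L.reverse)).length - L.length - (L.length + 1)
                = rest.length := by simp
            rw [h2, List.take_left' rfl]
        dsimp only
        rw [hget, hsub]
        cases hidx : PySem.List.index? rest c with
        | none =>
          have hnotmem : c ∉ rest := (PySem.List.index?_eq_none_iff rest c).mp hidx
          have hcount : ¬ PySem.List.count rest c > 0 := by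
            rw [PySem.List.count_eq]
            simp [List.count_eq_zero.mpr hnotmem]
          dsimp only
          rw [if_neg hcount]
          -- the unpaired character is moved to the exact middle of the middle zone
          have hx : L ++ c :: rest ++ L.reverse = (L ++ [c]) ++ (rest ++ L.reverse) := by simp
          have hklerest : half - L.length - 1 ≤ rest.length := by
            simp at hhalf2; omega
          have hinsert : PySem.List.insert (L ++ c :: rest ++ L.reverse) (half : Int) c
              = L ++ (c :: (rest.take (half - L.length - 1)
                  ++ c :: (rest.drop (half - L.length - 1) ++ L.reverse))) := by
            rw [hx, PySem.List.insert_natCast _ half c (by simp; omega)]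
            rw [List.take_append, List.drop_append]
            rw [List.take_of_length_le (by simp; omega), List.drop_of_length_le (by simp; omega)]
            have e1 : half - (L ++ [c]).length = half - L.length - 1 := by simp; omega
            rw [e1]
            rw [List.take_append_of_le_length hklerest]
            rw [List.drop_append]
            have e2 : half - L.length - 1 - rest.length = 0 := by omega
            rw [e2]
            simp
          rw [hinsert]
          rw [PySem.List.pop?_natCast _ L.length (by simp)]
          dsimp only
          have herase : (L ++ (c :: (rest.take (half - L.length - 1)
                ++ c :: (rest.drop (half - L.length - 1) ++ L.reverse)))).eraseIdx L.length
              = L ++ (rest.take (half - L.length - 1)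
                ++ c :: (rest.drop (half - L.length - 1) ++ L.reverse)) := by
            simpa using pvEraseMid L (c :: (rest.take (half - L.length - 1)
                ++ c :: (rest.drop (half - L.length - 1) ++ L.reverse))) 0
          rw [herase]
          have hassoc : L ++ (rest.take (half - L.length - 1)
                ++ c :: (rest.drop (half - L.length - 1) ++ L.reverse))
              = L ++ (rest.take (half - L.length - 1)
                ++ c :: rest.drop (half - L.length - 1)) ++ L.reverse := by simp
          rw [hassoc]
          have hlenM : (rest.take (half - L.length - 1)
              ++ c :: rest.drop (half - L.length - 1)).length = rest.length + 1 := by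
            simp
          exact ih L _ (u + 1) half (by rw [hlenM]; simpa using hh) (by simp at hf ⊢; omega)
        | some j =>
          obtain ⟨hjlt, hjc, -⟩ := PySem.List.getElem_of_index?_eq_some hidx
          have hmem : c ∈ rest := hjc ▸ List.getElem_mem hjlt
          have hcount : PySem.List.count rest c > 0 := by
            rw [PySem.List.count_eq]
            exact List.count_pos_iff.mpr hmem
          dsimp only
          rw [if_pos hcount, hidx]
          dsimp only
          have hxx : L ++ c :: rest ++ L.reverse = (L ++ [c]) ++ (rest ++ L.reverse) := by simp
          rw [hxx, PySem.List.pop?_natCast _ (j + L.length + 1) (by simp; omega)]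
          dsimp only
          have herase : ((L ++ [c]) ++ (rest ++ L.reverse)).eraseIdx (j + L.length + 1)
              = (L ++ [c]) ++ (rest.eraseIdx j ++ L.reverse) := by
            have h0 : j + L.length + 1 = (L ++ [c]).length + j := by simp; omega
            rw [h0, pvEraseMid, pvEraseLeft _ _ _ hjlt]
          rw [herase]
          have hlenE : (rest.eraseIdx j).length = rest.length - 1 := by
            simp [List.length_eraseIdx, hjlt]
          -- both insert forms produce the next invariant state (L ++ [c], rest.eraseIdx j)
          suffices hS : palindromeLoopA half
                ((L ++ [c]) ++ (rest.take j ++ rest.drop (j + 1)) ++ (L ++ [c]).reverse)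
                ((L ++ [c]).length) u
              = palindromeGoB half (L ++ [c]) (rest.take j ++ rest.drop (j + 1)) u by
            have hTD : rest.eraseIdx j = rest.take j ++ rest.drop (j + 1) :=
              List.eraseIdx_eq_take_drop_succ rest j
            by_cases hL : L.length = 0
            · have hLnil : L = [] := List.eq_nil_of_length_eq_zero hL
              subst hLnil
              rw [if_pos hL]
              simpa [hTD] using hS
            · rw [if_neg hL]
              have hins := pvInsertNeg ((L ++ [c]) ++ (rest.eraseIdx j ++ L.reverse)) L.length
                (by omega) c
              have hlen2 : ((L ++ [c]) ++ (rest.eraseIdx j ++ L.reverse)).length - L.length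
                  = ((L ++ [c]) ++ rest.eraseIdx j).length := by
                simp [hlenE]
                omega
              rw [hlen2] at hins
              have hre : (L ++ [c]) ++ (rest.eraseIdx j ++ L.reverse)
                  = ((L ++ [c]) ++ rest.eraseIdx j) ++ L.reverse := by simp
              rw [hre, List.take_left' rfl, List.drop_left' rfl] at hins
              rw [hre, hins]
              have e : ((L ++ [c]) ++ rest.eraseIdx j) ++ c :: L.reverse
                  = (L ++ [c]) ++ (rest.take j ++ rest.drop (j + 1)) ++ (L ++ [c]).reverse := by
                simp [hTD]
              have e2 : L.length + 1 = (L ++ [c]).length := by simp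
              rw [e, e2]
              exact hS
          have hlenM : (rest.take j ++ rest.drop (j + 1)).length = rest.length - 1 := by
            simp
            omega
          exact ih (L ++ [c]) _ u half (by rw [hlenM]; simp at hh ⊢; omega) (by simp at hf ⊢; omega)

-- ===== VERDICT (by name: the statement is the Claim_ definition above) =====
theorem palindrome_spec : Claim_equal_palindrome := by
  intro s _
  unfold Spec_palindrome palindrome palindrome_alt
  have h := loopA_eq_goB (3 * s.toList.length + 2) [] s.toList 0
      (s.toList.length / 2 + 1) (by simp) (by omega)
  simpa using h
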